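-- pv_equiv track=rewrite | github.com/samuelbeaubien/advent-of-code-2023 | src/day-14/silver.py | squish_one_row
-- ===== SOURCE A (Python) =====
-- def squish_one_row(row: str) -> str:
--     parts = row.split('#')
--     new_parts = []
--     for part in parts:
--         new_part = ""
--         num_boulders = part.count('O')
--         num_dots = len(part) - num_boulders
--         new_part = 'O'*num_boulders + '.'*num_dots
--         new_parts.append(new_part)
--     squished_row = "#".join(new_parts)
--     return squished_row
-- ===== SOURCE B (Python) =====
-- def squish_one_row(row: str) -> str:
--     # single left-to-right pass: count boulders and dots per segment, emit at each wall
--     out = []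
--     boulders = 0
--     dots = 0
--     for c in row:
--         if c == '#':
--             out.append('O' * boulders + '.' * dots + '#')
--             boulders = 0
--             dots = 0
--         elif c == 'O':
--             boulders += 1
--         else:
--             dots += 1
--     out.append('O' * boulders + '.' * dots)
--     return ''.join(out)
-- ===== Notes on version B (the rewrite author's own statement) =====
-- stated objective: alternative
-- what changed: Replaces the split-on-wall, per-segment count-and-rebuild, and join with a single left-to-right pass that keeps boulder/dot counters and flushes a rebuilt segment at each wall character.
import Mathlib
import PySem

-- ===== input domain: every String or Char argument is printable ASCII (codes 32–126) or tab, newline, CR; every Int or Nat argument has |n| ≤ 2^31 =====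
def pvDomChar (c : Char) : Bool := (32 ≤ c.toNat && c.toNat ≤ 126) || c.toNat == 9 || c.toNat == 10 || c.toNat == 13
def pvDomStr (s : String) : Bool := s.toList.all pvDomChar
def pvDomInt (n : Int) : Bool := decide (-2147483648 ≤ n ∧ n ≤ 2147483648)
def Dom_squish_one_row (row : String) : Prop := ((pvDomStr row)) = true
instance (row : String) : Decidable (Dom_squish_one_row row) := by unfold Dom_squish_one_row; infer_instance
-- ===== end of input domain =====

-- B replaces split/count-and-rebuild/join with one pass keeping boulder and dot counters per segment (alternative decomposition, same cost).

-- ===== PORT A =====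
def squish_one_row (row : String) : String :=
  let parts := PySem.Chars.splitOn row.toList ['#']
  let new_parts := parts.foldl (fun acc part =>
      let num_boulders := PySem.Chars.count part ['O']
      let num_dots := part.length - num_boulders
      let new_part := List.replicate num_boulders 'O' ++ List.replicate num_dots '.'
      acc ++ [new_part]) []
  String.ofList (PySem.Chars.join ['#'] new_parts)

-- ===== PORT B =====
def pvStepB (st : List Char × Nat × Nat) (c : Char) : List Char × Nat × Nat :=
  if c = '#' then
    (st.1 ++ (List.replicate st.2.1 'O' ++ List.replicate st.2.2 '.' ++ ['#']), 0, 0)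
  else if c = 'O' then (st.1, st.2.1 + 1, st.2.2)
  else (st.1, st.2.1, st.2.2 + 1)

def squish_one_row_alt (row : String) : String :=
  let st := row.toList.foldl pvStepB ([], 0, 0)
  String.ofList (st.1 ++ (List.replicate st.2.1 'O' ++ List.replicate st.2.2 '.'))

-- ===== PRECONDITION & SPEC =====
def Spec_squish_one_row (row : String) (out : String) : Prop := out = squish_one_row_alt row
instance (row : String) (out : String) : Decidable (Spec_squish_one_row row out) := by unfold Spec_squish_one_row; infer_instance

-- ===== CLAIM (what is proved, stated in full; the proofs are below) =====
def Claim_equal_squish_one_row : Prop := ∀ (row : String), Dom_squish_one_row row → Spec_squish_one_row row (squish_one_row row)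

-- ===== LEMMAS AND PROOFS =====

/-- Simple structural single-char split on '#'. -/
def pvConsHead (c : Char) : List (List Char) → List (List Char)
  | [] => [[c]]
  | p :: ps => (c :: p) :: ps

def pvSplitHash : List Char → List (List Char)
  | [] => [[]]
  | c :: rest => if c = '#' then [] :: pvSplitHash rest else pvConsHead c (pvSplitHash rest)

theorem pvSplitHash_ne_nil (cs : List Char) : pvSplitHash cs ≠ [] := by
  induction cs with
  | nil => simp [pvSplitHash]
  | cons c rest ih =>
    simp only [pvSplitHash]
    split
    · simp
    · cases h : pvSplitHash rest with
      | nil => exact absurd h ih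
      | cons p ps => simp [pvConsHead]

theorem pvSplitOn_go_eq (fuel : Nat) (l cur : List Char)
    (accs : List (List Char)) (h : l.length < fuel) :
    PySem.Chars.splitOn.go ['#'] fuel l cur accs
      = accs.reverse ++ (cur.reverse ++ (pvSplitHash l).headI) :: (pvSplitHash l).tail := by
  induction fuel generalizing l cur accs with
  | zero => omega
  | succ fuel ih =>
    cases l with
    | nil =>
      simp [PySem.Chars.splitOn.go, pvSplitHash]
    | cons c rest =>
      by_cases hc : c = '#'
      · subst hc
        have hpre : (['#'] : List Char).isPrefixOf ('#' :: rest) = true := by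
          simp [List.isPrefixOf]
        rw [PySem.Chars.splitOn.go]
        simp only [hpre, if_true, List.length_singleton, List.drop_one, List.tail_cons]
        rw [ih rest [] (cur.reverse :: accs) (by simpa using Nat.lt_of_succ_lt_succ h)]
        simp only [pvSplitHash, reduceIte]
        cases hsp : pvSplitHash rest with
        | nil => exact absurd hsp (pvSplitHash_ne_nil rest)
        | cons p ps => simp
      · have hpre : (['#'] : List Char).isPrefixOf (c :: rest) = false := by
          simp [List.isPrefixOf]
          intro hc'; exact absurd hc'.symm hc
        rw [PySem.Chars.splitOn.go]
        simp only [hpre, Bool.false_eq_true, if_false]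
        rw [ih rest (c :: cur) accs (by simpa using Nat.lt_of_succ_lt_succ h)]
        simp only [pvSplitHash, hc, if_false]
        cases hsp : pvSplitHash rest with
        | nil => exact absurd hsp (pvSplitHash_ne_nil rest)
        | cons p ps => simp [pvConsHead]

theorem pvSplitOn_hash (cs : List Char) : PySem.Chars.splitOn cs ['#'] = pvSplitHash cs := by
  rw [PySem.Chars.splitOn, pvSplitOn_go_eq (cs.length + 1) cs [] [] (by omega)]
  cases h : pvSplitHash cs with
  | nil => exact absurd h (pvSplitHash_ne_nil cs)
  | cons p ps => simp

theorem pvCount_go_eq (fuel : Nat) (l : List Char) (acc : Nat) (h : l.length ≤ fuel) :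
    PySem.Chars.count.go ['O'] fuel l acc = acc + l.count 'O' := by
  induction fuel generalizing l acc with
  | zero =>
    cases l with
    | nil => simp [PySem.Chars.count.go]
    | cons c rest => simp at h
  | succ fuel ih =>
    cases l with
    | nil => simp [PySem.Chars.count.go]
    | cons c rest =>
      by_cases hc : c = 'O'
      · subst hc
        have hpre : (['O'] : List Char).isPrefixOf ('O' :: rest) = true := by
          simp [List.isPrefixOf]
        rw [PySem.Chars.count.go]
        simp only [hpre, if_true, List.length_singleton, List.drop_one, List.tail_cons]
        rw [ih rest (acc + 1) (by simpa using h)]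
        simp
        omega
      · have hpre : (['O'] : List Char).isPrefixOf (c :: rest) = false := by
          simp [List.isPrefixOf]
          intro hc'; exact absurd hc'.symm hc
        rw [PySem.Chars.count.go]
        simp only [hpre, Bool.false_eq_true, if_false]
        rw [ih rest acc (by simpa using Nat.le_of_succ_le_succ (by simpa using h))]
        simp [hc]

theorem pvCount_O (p : List Char) : PySem.Chars.count p ['O'] = p.count 'O' := by
  rw [PySem.Chars.count]
  simp only [List.isEmpty_cons, Bool.false_eq_true, if_false]
  rw [pvCount_go_eq p.length p 0 (le_refl _)]
  omega

/-- A's per-segment rebuild. -/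
def pvRender (p : List Char) : List Char :=
  List.replicate (p.count 'O') 'O' ++ List.replicate (p.length - p.count 'O') '.'

theorem pvIntercalate_cons (x : List Char) (xs : List (List Char)) :
    List.intercalate ['#'] (x :: xs) = x ++ xs.flatMap (fun p => '#' :: p) := by
  induction xs generalizing x with
  | nil => simp [List.intercalate]
  | cons y ys ih =>
    have h2 : List.intercalate ['#'] (x :: y :: ys)
        = x ++ ['#'] ++ List.intercalate ['#'] (y :: ys) := by
      simp [List.intercalate, List.intersperse]
    rw [h2, ih y]
    simp [List.flatMap_cons]

/-- The common recursive specification both ports meet. -/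
def pvSpec : List Char → Nat → Nat → List Char
  | [], b, d => List.replicate b 'O' ++ List.replicate d '.'
  | c :: rest, b, d =>
    if c = '#' then List.replicate b 'O' ++ List.replicate d '.' ++ '#' :: pvSpec rest 0 0
    else if c = 'O' then pvSpec rest (b + 1) d else pvSpec rest b (d + 1)

theorem pvB_fold (cs : List Char) (acc : List Char) (b d : Nat) :
    (cs.foldl pvStepB (acc, b, d)).1
      ++ (List.replicate (cs.foldl pvStepB (acc, b, d)).2.1 'O'
      ++ List.replicate (cs.foldl pvStepB (acc, b, d)).2.2 '.')
      = acc ++ pvSpec cs b d := by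
  induction cs generalizing acc b d with
  | nil => simp [pvSpec]
  | cons c rest ih =>
    by_cases hc : c = '#'
    · subst hc
      simp only [List.foldl_cons, pvStepB, if_true]
      rw [ih]
      simp [pvSpec]
    · by_cases ho : c = 'O'
      · subst ho
        simp only [List.foldl_cons, pvStepB, reduceIte]
        rw [ih]
        simp [pvSpec]
      · simp only [List.foldl_cons, pvStepB, hc, ho, if_false]
        rw [ih]
        simp [pvSpec, hc, ho]

theorem pvSpec_eq (cs : List Char) (b d : Nat) :
    pvSpec cs b d
      = List.replicate (b + (pvSplitHash cs).headI.count 'O') 'O'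
        ++ List.replicate (d + ((pvSplitHash cs).headI.length - (pvSplitHash cs).headI.count 'O')) '.'
        ++ (pvSplitHash cs).tail.flatMap (fun p => '#' :: pvRender p) := by
  induction cs generalizing b d with
  | nil => simp [pvSpec, pvSplitHash]
  | cons c rest ih =>
    by_cases hc : c = '#'
    · subst hc
      simp only [pvSpec, pvSplitHash, reduceIte, List.headI, List.tail_cons]
      rw [ih]
      cases hsp : pvSplitHash rest with
      | nil => exact absurd hsp (pvSplitHash_ne_nil rest)
      | cons p ps =>
        simp [List.flatMap_cons, pvRender]
    · cases hsp : pvSplitHash rest with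
      | nil => exact absurd hsp (pvSplitHash_ne_nil rest)
      | cons p ps =>
        by_cases ho : c = 'O'
        · subst ho
          simp only [pvSpec, hc, if_false, reduceIte, pvSplitHash, pvConsHead, hsp]
          rw [ih]
          simp [hsp]
          omega
        · simp only [pvSpec, hc, ho, if_false, pvSplitHash, pvConsHead, hsp]
          rw [ih]
          simp [hsp, ho]
          have hcl : List.count 'O' p ≤ p.length := List.count_le_length
          omega

-- ===== VERDICT (by name: the statement is the Claim_ definition above) =====
theorem squish_one_row_spec : Claim_equal_squish_one_row := by
  intro row _
  unfold Spec_squish_one_row squish_one_row squish_one_row_alt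
  simp only [pvSplitOn_hash, PySem.Chars.join]
  rw [PySem.List.foldl_append_singleton_eq_map]
  cases hsp : pvSplitHash row.toList with
  | nil => exact absurd hsp (pvSplitHash_ne_nil row.toList)
  | cons p ps =>
    have hB := pvB_fold row.toList [] 0 0
    rw [pvSpec_eq, hsp] at hB
    simp only [List.nil_append, List.headI, List.tail_cons, Nat.zero_add] at hB
    simp only [List.nil_append, List.map_cons]
    rw [pvIntercalate_cons]
    congr 1
    rw [hB]
    simp [pvCount_O, pvRender, List.flatMap_map]
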